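-- pv_equiv track=rewrite | github.com/Elizabeth1401/ADS-exercises | practice/code/big-o_exercises.py | n_times_log_m
-- ===== SOURCE A (Python) =====
-- def n_times_log_m(n, m):
--     # For each of the n iterations, inner while halves x until 0
--     # Inner work per outer loop = log2(m)
--     total = 0
--     for _ in range(n):  # n times
--         x = m
--         while x > 0:    # log2(m) iterations
--             x //= 2
--             total += 1
--     return total        # Total: Θ(n * log m)
-- ===== SOURCE B (Python) =====
-- def n_times_log_m(n, m):
--     # closed form: each outer iteration adds bit_length(m) (0 if m <= 0)
--     if n <= 0 or m <= 0:
--         return 0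
--     return n * m.bit_length()
-- ===== Notes on version B (the rewrite author's own statement) =====
-- stated objective: faster
-- what changed: replaced the n*log(m) double loop by the closed form n * m.bit_length() (0 when n<=0 or m<=0)
import Mathlib
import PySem

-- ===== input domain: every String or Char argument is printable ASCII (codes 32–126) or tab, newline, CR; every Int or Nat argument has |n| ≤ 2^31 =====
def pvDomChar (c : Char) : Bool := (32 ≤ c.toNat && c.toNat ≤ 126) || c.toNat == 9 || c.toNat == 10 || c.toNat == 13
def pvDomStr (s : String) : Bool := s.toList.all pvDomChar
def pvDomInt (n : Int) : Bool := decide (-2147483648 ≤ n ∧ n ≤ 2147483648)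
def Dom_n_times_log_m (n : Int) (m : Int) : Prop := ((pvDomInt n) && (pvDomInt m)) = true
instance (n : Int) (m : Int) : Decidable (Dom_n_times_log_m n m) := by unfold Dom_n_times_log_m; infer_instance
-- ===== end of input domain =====

-- B replaces A's n*log(m) double loop by the closed form n * bit_length(m); return values proved equal.

-- ===== PORT A =====
-- inner 'while x > 0: x //= 2; total += 1'
def pvHalveLoop (x : Int) (total : Int) : Int :=
  if h : 0 < x then pvHalveLoop (PySem.Int.floordiv x 2) (total + 1) else total
termination_by x.toNat
decreasing_by
  have h2 : PySem.Int.floordiv x 2 = x / 2 := PySem.Int.floordiv_eq_ediv_of_pos (by omega)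
  rw [h2]; omega

def n_times_log_m (n : Int) (m : Int) : Int :=
  (PySem.List.pyRange 0 n 1).foldl (fun total _ => pvHalveLoop m total) 0

-- ===== PORT B =====
def n_times_log_m_alt (n : Int) (m : Int) : Int :=
  if n ≤ 0 ∨ m ≤ 0 then 0 else n * (PySem.Int.bitLength m : Int)

-- ===== PRECONDITION & SPEC =====
def Spec_n_times_log_m (n : Int) (m : Int) (out : Int) : Prop := out = n_times_log_m_alt n m
instance (n : Int) (m : Int) (out : Int) : Decidable (Spec_n_times_log_m n m out) := by unfold Spec_n_times_log_m; infer_instance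

-- ===== CLAIM (what is proved, stated in full; the proofs are below) =====
def Claim_equal_n_times_log_m : Prop := ∀ (n : Int) (m : Int), Dom_n_times_log_m n m → Spec_n_times_log_m n m (n_times_log_m n m)

-- ===== LEMMAS AND PROOFS =====

-- the inner while loop adds bitLength x (0 when x ≤ 0) to the accumulator
theorem pvHalveLoop_eq (x total : Int) :
    pvHalveLoop x total = total + (if 0 < x then (PySem.Int.bitLength x : Int) else 0) := by
  induction x, total using pvHalveLoop.induct with
  | case1 x total h ih =>
    rw [pvHalveLoop, dif_pos h, ih, if_pos h, PySem.Int.bitLength_of_pos h]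
    have h2 : PySem.Int.floordiv x 2 = x / 2 := PySem.Int.floordiv_eq_ediv_of_pos (by omega)
    by_cases hp : 0 < PySem.Int.floordiv x 2
    · rw [if_pos hp]; push_cast; ring
    · rw [if_neg hp]
      have hz : PySem.Int.floordiv x 2 = 0 := by rw [h2] at hp ⊢; omega
      rw [hz]
      simp [PySem.Int.bitLength_zero]
  | case2 x total h =>
    rw [pvHalveLoop, dif_neg h, if_neg h]; ring

theorem foldl_const_add (c : Int) (l : List Int) : ∀ t : Int,
    l.foldl (fun acc _ => acc + c) t = t + l.length * c := by
  induction l with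
  | nil => intro t; simp
  | cons a l ih => intro t; simp [List.foldl, ih]; ring

-- ===== VERDICT (by name: the statement is the Claim_ definition above) =====
theorem n_times_log_m_spec : Claim_equal_n_times_log_m := by
  intro n m _
  unfold Spec_n_times_log_m n_times_log_m n_times_log_m_alt
  have hfun : (fun (total : Int) (_ : Int) => pvHalveLoop m total)
      = fun total _ => total + (if 0 < m then (PySem.Int.bitLength m : Int) else 0) := by
    funext t x; exact pvHalveLoop_eq m t
  rw [hfun, foldl_const_add, PySem.List.length_pyRange_one]
  by_cases hm : 0 < m
  · rw [if_pos hm]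
    by_cases hn : 0 < n
    · rw [if_neg (by omega)]
      have : ((n - 0).toNat : Int) = n := by omega
      rw [this]; ring
    · rw [if_pos (Or.inl (by omega : n ≤ 0))]
      have h0 : (n - 0).toNat = 0 := by omega
      rw [h0]; simp
  · rw [if_neg hm, if_pos (Or.inr (by omega : m ≤ 0))]
    simp
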